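-- pv_equiv track=rewrite | github.com/PiotrBosowski/TriangleBanana | ThirdTask/ThirdTask.py | check_digit_groups
-- ===== SOURCE A (Python) =====
-- def check_digit_groups(string):
--     is_in_group = False
--     number_of_groups = 0
--     for i in range(1, len(string)):
--         if string[i] == string[i-1]:
--             if not is_in_group:
--                 is_in_group = True
--                 number_of_groups += 1
--         else:
--             is_in_group = False
--     return number_of_groups >= 2
-- ===== SOURCE B (Python) =====
-- def check_digit_groups(string):
--     # Run-skipping scan: find each maximal run of equal characters directly
--     # and count the runs of length >= 2, instead of A's per-index flag machine.
--     count = 0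
--     n = len(string)
--     i = 0
--     while i < n:
--         j = i + 1
--         while j < n and string[j] == string[i]:
--             j += 1
--         if j - i >= 2:
--             count += 1
--         i = j
--     return count >= 2
-- ===== Notes on version B (the rewrite author's own statement) =====
-- stated objective: alternative
-- what changed: B scans the string run by run (an inner loop skips each maximal run of equal characters, then counts it if its length is >= 2) instead of A's per-index scan with an is_in_group flag.
import Mathlib
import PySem

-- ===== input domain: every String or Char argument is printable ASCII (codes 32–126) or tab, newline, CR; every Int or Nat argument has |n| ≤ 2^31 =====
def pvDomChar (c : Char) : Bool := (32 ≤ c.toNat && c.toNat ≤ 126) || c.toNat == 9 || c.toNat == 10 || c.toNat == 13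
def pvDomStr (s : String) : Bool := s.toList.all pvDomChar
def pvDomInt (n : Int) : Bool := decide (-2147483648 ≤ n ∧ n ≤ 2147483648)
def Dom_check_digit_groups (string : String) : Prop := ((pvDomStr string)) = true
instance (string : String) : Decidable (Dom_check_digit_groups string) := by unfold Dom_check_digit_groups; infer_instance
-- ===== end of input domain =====

-- B replaces A's per-index flag scan by a run-skipping scan (count maximal runs of length ≥ 2); same O(n) cost, alternative structure.

-- ===== PORT A =====
-- for i in range(1, len(string)): flag/counter state machine, foldl over pyRange
def check_digit_groups (string : String) : Bool :=
  let fin := (PySem.List.pyRange 1 (PySem.Str.len string) 1).foldl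
    (fun (st : Bool × Int) i =>
      if PySem.Str.pyGet? string i = PySem.Str.pyGet? string (i - 1) then
        if !st.1 then (true, st.2 + 1) else st
      else
        (false, st.2))
    (false, 0)
  decide (fin.2 ≥ 2)

-- ===== PORT B =====
-- inner while: run - 1 = number of leading characters of `t` equal to rest[0]
def pvRunLen (c : Char) : List Char → Nat
  | [] => 0
  | x :: xs => if x = c then 1 + pvRunLen c xs else 0

-- outer while: skip one maximal run at a time, count it if its length ≥ 2
def pvCountRuns : List Char → Int
  | [] => 0
  | c :: t =>
      let run := 1 + pvRunLen c t
      (if run ≥ 2 then (1 : Int) else 0) + pvCountRuns (t.drop (pvRunLen c t))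
  termination_by l => l.length
  decreasing_by simp

def check_digit_groups_alt (string : String) : Bool :=
  decide (pvCountRuns string.toList ≥ 2)

-- ===== PRECONDITION & SPEC =====
def Spec_check_digit_groups (string : String) (out : Bool) : Prop := out = check_digit_groups_alt string
instance (string : String) (out : Bool) : Decidable (Spec_check_digit_groups string out) := by unfold Spec_check_digit_groups; infer_instance

-- ===== CLAIM (what is proved, stated in full; the proofs are below) =====
def Claim_equal_check_digit_groups : Prop := ∀ (string : String), Dom_check_digit_groups string → Spec_check_digit_groups string (check_digit_groups string)

-- ===== LEMMAS AND PROOFS =====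

theorem pvLen_eq (s : String) : PySem.Str.len s = (s.toList.length : Int) := by
  simp

theorem pvCountRuns_nil : pvCountRuns [] = 0 := by
  rw [pvCountRuns.eq_def]

theorem pvCountRuns_singleton (c : Char) : pvCountRuns [c] = 0 := by
  rw [pvCountRuns.eq_def]; simp [pvRunLen, pvCountRuns_nil]

theorem pvDrop_runLen (c : Char) (t : List Char) :
    t.drop (pvRunLen c t) = t.dropWhile (fun y => y = c) := by
  induction t with
  | nil => rfl
  | cons x xs ih =>
      by_cases h : x = c
      · rw [pvRunLen, if_pos h, Nat.add_comm, List.drop_succ_cons, ih,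
          List.dropWhile_cons, if_pos (by simp [h])]
      · rw [pvRunLen, if_neg h, List.drop_zero, List.dropWhile_cons,
          if_neg (by simp [h])]

theorem pvCountRuns_cons_cons (a b : Char) (t : List Char) :
    pvCountRuns (a :: b :: t) =
      (if b = a then 1 + pvCountRuns (t.dropWhile (fun y => y = a))
       else pvCountRuns (b :: t)) := by
  by_cases h : b = a
  · rw [if_pos h]
    conv_lhs => rw [pvCountRuns.eq_def]
    simp only [pvRunLen, if_pos h]
    rw [if_pos (by omega), Nat.add_comm, List.drop_succ_cons, pvDrop_runLen]
  · rw [if_neg h]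
    conv_lhs => rw [pvCountRuns.eq_def]
    simp only [pvRunLen, if_neg h]
    rw [if_neg (by omega), List.drop_zero]
    ring

theorem pvMain (string : String) (ys : List Char) :
    ∀ (k : Nat) (prev : Char) (ig : Bool) (c : Int),
      1 ≤ k → string.toList.drop k = ys → string.toList[k-1]? = some prev →
      ∃ fl : Bool,
        (PySem.List.pyRange (k : Int) (PySem.Str.len string) 1).foldl
          (fun (st : Bool × Int) i =>
            if PySem.Str.pyGet? string i = PySem.Str.pyGet? string (i - 1) then
              if !st.1 then (true, st.2 + 1) else st
            else
              (false, st.2)) (ig, c)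
        = (fl, c + (if ig then pvCountRuns (ys.dropWhile (fun y => y = prev))
                    else pvCountRuns (prev :: ys))) := by
  induction ys with
  | nil =>
      intro k prev ig c hk hdrop _
      have hlen : string.toList.length ≤ k := by
        by_contra h
        have := List.drop_eq_nil_iff.mp hdrop
        omega
      rw [PySem.List.pyRange_one_eq_nil (by rw [pvLen_eq]; exact_mod_cast hlen)]
      refine ⟨ig, ?_⟩
      cases ig <;>
        simp [pvCountRuns_nil, pvCountRuns_singleton, List.dropWhile]
  | cons x ys' ih =>
      intro k prev ig c hk hdrop hprev
      have hklt : k < string.toList.length := by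
        by_contra h
        rw [List.drop_eq_nil_iff.mpr (by omega)] at hdrop
        exact absurd hdrop (by simp)
      have hx : string.toList[k]? = some x := by
        have h0 : (string.toList.drop k)[0]? = some x := by rw [hdrop]; rfl
        rwa [List.getElem?_drop, Nat.add_zero] at h0
      rw [PySem.List.pyRange_one_cons (by rw [pvLen_eq]; exact_mod_cast hklt)]
      rw [List.foldl_cons]
      have hcast : ((k : Int) - 1) = ((k - 1 : Nat) : Int) := by omega
      have hget : PySem.Str.pyGet? string (k : Int) = some x := by
        rw [PySem.Str.pyGet?_natCast]; exact hx
      have hget' : PySem.Str.pyGet? string ((k : Int) - 1) = some prev := by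
        rw [hcast, PySem.Str.pyGet?_natCast]; exact hprev
      have hdrop' : string.toList.drop (k + 1) = ys' := by
        rw [← List.drop_drop, hdrop]; rfl
      have hx' : string.toList[(k+1)-1]? = some x := by simpa using hx
      have hpush : ((k : Int) + 1) = ((k + 1 : Nat) : Int) := by omega
      by_cases hxy : x = prev
      · subst hxy
        rw [hget, hget', if_pos rfl]
        cases ig with
        | false =>
            obtain ⟨fl, hfl⟩ := ih (k+1) x true (c+1) (by omega) hdrop' hx'
            refine ⟨fl, ?_⟩
            simp only [Bool.not_false, Bool.false_eq_true, if_true, if_false] at hfl ⊢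
            rw [hpush, hfl, pvCountRuns_cons_cons, if_pos rfl, Prod.mk.injEq]
            exact ⟨rfl, by ring⟩
        | true =>
            obtain ⟨fl, hfl⟩ := ih (k+1) x true c (by omega) hdrop' hx'
            refine ⟨fl, ?_⟩
            simp only [Bool.not_true, Bool.false_eq_true, if_true, if_false] at hfl ⊢
            rw [hpush, hfl, List.dropWhile_cons, if_pos (by simp)]
      · rw [hget, hget', if_neg (by simpa using hxy)]
        obtain ⟨fl, hfl⟩ := ih (k+1) x false c (by omega) hdrop' hx'
        refine ⟨fl, ?_⟩
        cases ig with
        | false =>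
            simp only [Bool.false_eq_true, if_false] at hfl ⊢
            rw [hpush, hfl, pvCountRuns_cons_cons, if_neg (by simpa using hxy)]
        | true =>
            simp only [Bool.false_eq_true, if_false, if_true] at hfl ⊢
            rw [hpush, hfl, List.dropWhile_cons, if_neg (by simp [hxy])]

-- ===== VERDICT (by name: the statement is the Claim_ definition above) =====
theorem check_digit_groups_spec : Claim_equal_check_digit_groups := by
  intro string _
  unfold Spec_check_digit_groups check_digit_groups check_digit_groups_alt
  cases hl : string.toList with
  | nil =>
      have hlen : string.toList.length = 0 := by rw [hl]; rfl
      rw [PySem.List.pyRange_one_eq_nil (by rw [pvLen_eq, hlen]; norm_num)]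
      simp [hl, pvCountRuns_nil]
  | cons x t =>
      obtain ⟨fl, hfl⟩ := pvMain string t 1 x false 0 (by omega)
        (by rw [hl]; rfl) (by rw [hl]; rfl)
      rw [show ((1 : Nat) : Int) = 1 from rfl] at hfl
      simp only [Bool.false_eq_true, if_false, zero_add] at hfl
      rw [hfl]
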